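-- pv_equiv track=rewrite | github.com/this-is-real/algorithm | exhaustive_search/모의고사(42840)/이노아.py | solution
-- ===== SOURCE A (Python) =====
-- def solution(answers):
--     a = [1,2,3,4,5]
--     b = [2,1,2,3,2,4,2,5]
--     c = [3,3,1,1,2,2,4,4,5,5]
--     score = [0,0,0]
--
--     for per_idx, per in enumerate([a,b,c]):
--         for q_i in range(len(answers)):
--             if answers[q_i] == per[q_i % len(per)]:
--                 score[per_idx] += 1
--
--     return [ind+1 for ind,s in enumerate(score) if s == max(score)]
-- ===== SOURCE B (Python) =====
-- def solution(answers):
--     patterns = [[1, 2, 3, 4, 5],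
--                 [2, 1, 2, 3, 2, 4, 2, 5],
--                 [3, 3, 1, 1, 2, 2, 4, 4, 5, 5]]
--     # All three patterns are periodic with period dividing 40 = lcm(5, 8, 10),
--     # so bucket the answers once by (position mod 40, value) into a dict;
--     # each pattern's score is then a fixed 40-term sum of bucket counts.
--     cnt = {}
--     for i, ans in enumerate(answers):
--         key = (i % 40, ans)
--         cnt[key] = cnt.get(key, 0) + 1
--     score = [sum(cnt.get((r, p[r % len(p)]), 0) for r in range(40)) for p in patterns]
--     m = max(score)
--     return [i + 1 for i, s in enumerate(score) if s == m]
-- ===== Notes on version B (the rewrite author's own statement) =====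
-- stated objective: alternative
-- what changed: B buckets the answers once into a dict keyed by (index mod 40, value) — 40 being the common period of the three patterns — and computes each pattern's score as a fixed 40-term sum of bucket counts, instead of A's per-pattern rescans of the whole answer list.
import Mathlib
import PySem

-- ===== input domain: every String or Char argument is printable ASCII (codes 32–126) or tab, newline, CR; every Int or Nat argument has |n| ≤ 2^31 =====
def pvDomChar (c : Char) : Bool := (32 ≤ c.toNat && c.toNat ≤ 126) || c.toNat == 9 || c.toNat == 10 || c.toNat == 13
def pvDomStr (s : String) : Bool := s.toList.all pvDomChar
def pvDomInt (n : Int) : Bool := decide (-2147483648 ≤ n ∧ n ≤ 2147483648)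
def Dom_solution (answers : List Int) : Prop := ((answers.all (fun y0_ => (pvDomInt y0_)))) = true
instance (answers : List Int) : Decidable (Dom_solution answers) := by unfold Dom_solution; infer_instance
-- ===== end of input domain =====

-- B buckets the answers once into a dict keyed by (index mod 40, value) — 40 is the common period
-- of the three patterns — and computes each score as a fixed 40-term sum of bucket counts,
-- instead of A's per-pattern rescans of the answer list (objective: alternative).

-- ===== PORT A =====
def solution (answers : List Int) : List Int :=
  let a : List Int := [1,2,3,4,5]
  let b : List Int := [2,1,2,3,2,4,2,5]
  let c : List Int := [3,3,1,1,2,2,4,4,5,5]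
  let score : List Int :=
    (PySem.List.enumerate [a,b,c] 0).foldl (fun sc pp =>
      (PySem.List.pyRange 0 (answers.length : Int) 1).foldl (fun sc2 q =>
        if PySem.List.pyGetD answers q 0
             == PySem.List.pyGetD pp.2 (PySem.Int.mod q (pp.2.length : Int)) 0
        then PySem.List.pySetD sc2 pp.1 (PySem.List.pyGetD sc2 pp.1 0 + 1)
        else sc2) sc)
      [0,0,0]
  let m : Int := (PySem.List.max? score (fun x => x)).getD 0
  ((PySem.List.enumerate score 0).filter (fun p => p.2 == m)).map (fun p => p.1 + 1)

-- ===== PORT B =====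
def solution_alt (answers : List Int) : List Int :=
  let patterns : List (List Int) := [[1,2,3,4,5],[2,1,2,3,2,4,2,5],[3,3,1,1,2,2,4,4,5,5]]
  let cnt : PySem.Dict (Int × Int) Int :=
    (PySem.List.enumerate answers 0).foldl
      (fun d p => d.insert (PySem.Int.mod p.1 40, p.2) (d.getD (PySem.Int.mod p.1 40, p.2) 0 + 1))
      PySem.Dict.empty
  let score : List Int := patterns.map (fun p =>
    ((PySem.List.pyRange 0 40 1).map (fun r =>
      cnt.getD (r, PySem.List.pyGetD p (PySem.Int.mod r (p.length : Int)) 0) 0)).sum)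
  let m : Int := (PySem.List.max? score (fun x => x)).getD 0
  ((PySem.List.enumerate score 0).filter (fun q => q.2 == m)).map (fun q => q.1 + 1)

-- ===== PRECONDITION & SPEC =====
def Spec_solution (answers : List Int) (out : List Int) : Prop := out = solution_alt answers
instance (answers : List Int) (out : List Int) : Decidable (Spec_solution answers out) := by unfold Spec_solution; infer_instance

-- ===== CLAIM (what is proved, stated in full; the proofs are below) =====
def Claim_equal_solution : Prop := ∀ (answers : List Int), Dom_solution answers → Spec_solution answers (solution answers)

-- ===== LEMMAS AND PROOFS =====

-- A's inner loop bumps one fixed slot of the score list.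
theorem bump0 (c : Int → Bool) (l : List Int) (x y z : Int) :
    l.foldl (fun sc q => if c q then PySem.List.pySetD sc 0 (PySem.List.pyGetD sc 0 0 + 1) else sc) [x,y,z]
      = [x + (l.countP c : Int), y, z] := by
  induction l generalizing x with
  | nil => simp
  | cons h t ih =>
      by_cases hc : c h
      · rw [List.foldl_cons,
          show (if c h = true then PySem.List.pySetD [x,y,z] 0 (PySem.List.pyGetD [x,y,z] 0 0 + 1) else [x,y,z]) = [x+1,y,z]
            from by simp [hc, PySem.List.pySetD, PySem.List.pySet?, PySem.List.pyGetD, PySem.List.pyGet?, PySem.List.pyIdx?], ih]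
        simp [hc]; omega
      · rw [List.foldl_cons, if_neg (by simp [hc]), ih]
        simp [hc]

theorem bump1 (c : Int → Bool) (l : List Int) (x y z : Int) :
    l.foldl (fun sc q => if c q then PySem.List.pySetD sc 1 (PySem.List.pyGetD sc 1 0 + 1) else sc) [x,y,z]
      = [x, y + (l.countP c : Int), z] := by
  induction l generalizing y with
  | nil => simp
  | cons h t ih =>
      by_cases hc : c h
      · rw [List.foldl_cons,
          show (if c h = true then PySem.List.pySetD [x,y,z] 1 (PySem.List.pyGetD [x,y,z] 1 0 + 1) else [x,y,z]) = [x,y+1,z]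
            from by simp [hc, PySem.List.pySetD, PySem.List.pySet?, PySem.List.pyGetD, PySem.List.pyGet?, PySem.List.pyIdx?], ih]
        simp [hc]; omega
      · rw [List.foldl_cons, if_neg (by simp [hc]), ih]
        simp [hc]

theorem bump2 (c : Int → Bool) (l : List Int) (x y z : Int) :
    l.foldl (fun sc q => if c q then PySem.List.pySetD sc 2 (PySem.List.pyGetD sc 2 0 + 1) else sc) [x,y,z]
      = [x, y, z + (l.countP c : Int)] := by
  induction l generalizing z with
  | nil => simp
  | cons h t ih =>
      by_cases hc : c h
      · rw [List.foldl_cons,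
          show (if c h = true then PySem.List.pySetD [x,y,z] 2 (PySem.List.pyGetD [x,y,z] 2 0 + 1) else [x,y,z]) = [x,y,z+1]
            from by simp [hc, PySem.List.pySetD, PySem.List.pySet?, PySem.List.pyGetD, PySem.List.pyGet?, PySem.List.pyIdx?], ih]
        simp [hc]; omega
      · rw [List.foldl_cons, if_neg (by simp [hc]), ih]
        simp [hc]

-- A's q-loop over range(len(answers)) counts the same thing as a countP over enumerate.
theorem count_eq (answers pat : List Int) (len : Int) :
    (PySem.List.pyRange 0 (answers.length : Int) 1).countP
        (fun q => PySem.List.pyGetD answers q 0 == PySem.List.pyGetD pat (PySem.Int.mod q len) 0)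
      = (PySem.List.enumerate answers 0).countP
        (fun p => p.2 == PySem.List.pyGetD pat (PySem.Int.mod p.1 len) 0) := by
  rw [PySem.List.enumerate_eq_map_pyRange (d := 0), List.countP_map]
  rfl

-- the 0/1-indicator summed over a range that contains m exactly once
theorem sum_ind (g : Int → Int) (v a b m : Int) (h1 : a ≤ m) (h2 : m < b) :
    ((PySem.List.pyRange a b 1).map (fun r =>
        if ((m, v) : Int × Int) == (r, g r) then (1:Int) else 0)).sum
      = if v == g m then 1 else 0 := by
  rw [PySem.List.pyRange_one_append a m b h1 (le_of_lt h2),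
      PySem.List.pyRange_one_cons h2, List.map_append, List.sum_append, List.map_cons,
      List.sum_cons]
  have hl : ((PySem.List.pyRange a m 1).map (fun r =>
      if ((m, v) : Int × Int) == (r, g r) then (1:Int) else 0)).sum = 0 := by
    apply List.sum_eq_zero
    intro x hx
    simp only [List.mem_map] at hx
    obtain ⟨r, hr, hrx⟩ := hx
    rw [PySem.List.mem_pyRange_one] at hr
    rw [← hrx, if_neg (by simp; omega)]
  have hr : ((PySem.List.pyRange (m+1) b 1).map (fun r =>
      if ((m, v) : Int × Int) == (r, g r) then (1:Int) else 0)).sum = 0 := by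
    apply List.sum_eq_zero
    intro x hx
    simp only [List.mem_map] at hx
    obtain ⟨r, hr, hrx⟩ := hx
    rw [PySem.List.mem_pyRange_one] at hr
    rw [← hrx, if_neg (by simp; omega)]
  rw [hl, hr]
  by_cases hv : v = g m <;> simp [hv]

-- MAIN: summing bucket counts over the 40 residue classes recovers the direct count.
theorem bucket_sum (g : Int → Int) (L : List (Int × Int)) :
    ((PySem.List.pyRange 0 40 1).map (fun r =>
        ((L.map (fun x => ((PySem.Int.mod x.1 40, x.2) : Int × Int))).count (r, g r) : Int))).sum
      = (L.countP (fun x => x.2 == g (PySem.Int.mod x.1 40)) : Int) := by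
  induction L with
  | nil => simp
  | cons x t ih =>
      have hmod : PySem.Int.mod x.1 40 = x.1 % 40 := PySem.Int.mod_eq_emod_of_pos (by norm_num)
      have hb : 0 ≤ x.1 % 40 ∧ x.1 % 40 < 40 :=
        ⟨Int.emod_nonneg _ (by norm_num), Int.emod_lt_of_pos _ (by norm_num)⟩
      have hcnt : ∀ r : Int,
          ((((x :: t).map (fun y => ((PySem.Int.mod y.1 40, y.2) : Int × Int))).count (r, g r) : Int)
            = ((t.map (fun y => ((PySem.Int.mod y.1 40, y.2) : Int × Int))).count (r, g r) : Int)
              + (if ((PySem.Int.mod x.1 40, x.2) : Int × Int) == (r, g r) then 1 else 0)) := by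
        intro r
        rw [List.map_cons, List.count_cons]
        split_ifs <;> simp
      calc ((PySem.List.pyRange 0 40 1).map (fun r =>
              (((x :: t).map (fun y => ((PySem.Int.mod y.1 40, y.2) : Int × Int))).count (r, g r) : Int))).sum
          = ((PySem.List.pyRange 0 40 1).map (fun r =>
              ((t.map (fun y => ((PySem.Int.mod y.1 40, y.2) : Int × Int))).count (r, g r) : Int)
                + (if ((PySem.Int.mod x.1 40, x.2) : Int × Int) == (r, g r) then 1 else 0))).sum := by
            exact congrArg List.sum (List.map_congr_left (fun r _ => hcnt r))
        _ = ((PySem.List.pyRange 0 40 1).map (fun r =>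
              ((t.map (fun y => ((PySem.Int.mod y.1 40, y.2) : Int × Int))).count (r, g r) : Int))).sum
              + ((PySem.List.pyRange 0 40 1).map (fun r =>
                  if ((PySem.Int.mod x.1 40, x.2) : Int × Int) == (r, g r) then (1:Int) else 0)).sum := by
            rw [PySem.List.sum_map_add_int]
        _ = (t.countP (fun y => y.2 == g (PySem.Int.mod y.1 40)) : Int)
              + (if x.2 == g (PySem.Int.mod x.1 40) then 1 else 0) := by
            rw [ih, hmod, sum_ind g x.2 0 40 (x.1 % 40) hb.1 hb.2]
        _ = ((x :: t).countP (fun y => y.2 == g (PySem.Int.mod y.1 40)) : Int) := by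
            rw [List.countP_cons]
            split_ifs <;> simp

-- B's dict-bucket score for one pattern equals A's direct count, given the pattern's period divides 40.
theorem score_eq (answers pat : List Int) (len : Int) (hlen : 0 < len) (hdvd : len ∣ 40) :
    ((PySem.List.pyRange 0 40 1).map (fun r =>
        (((PySem.List.enumerate answers 0).foldl
            (fun d p => d.insert (PySem.Int.mod p.1 40, p.2) (d.getD (PySem.Int.mod p.1 40, p.2) 0 + 1))
            PySem.Dict.empty).getD (r, PySem.List.pyGetD pat (PySem.Int.mod r len) 0) 0))).sum
      = ((PySem.List.enumerate answers 0).countP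
          (fun p => p.2 == PySem.List.pyGetD pat (PySem.Int.mod p.1 len) 0) : Int) := by
  have hfold : (PySem.List.enumerate answers 0).foldl
      (fun d p => d.insert (PySem.Int.mod p.1 40, p.2) (d.getD (PySem.Int.mod p.1 40, p.2) 0 + 1))
      PySem.Dict.empty
      = PySem.Dict.counter ((PySem.List.enumerate answers 0).map (fun p => ((PySem.Int.mod p.1 40, p.2) : Int × Int))) := by
    rw [← PySem.Dict.foldl_insert_getD_add_one_eq_counter, List.foldl_map]
  rw [hfold]
  have hg : ∀ r : Int,
      (PySem.Dict.counter ((PySem.List.enumerate answers 0).map (fun p => ((PySem.Int.mod p.1 40, p.2) : Int × Int)))).getD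
          (r, PySem.List.pyGetD pat (PySem.Int.mod r len) 0) 0
        = (((PySem.List.enumerate answers 0).map (fun p => ((PySem.Int.mod p.1 40, p.2) : Int × Int))).count
            (r, PySem.List.pyGetD pat (PySem.Int.mod r len) 0) : Int) := by
    intro r; rw [PySem.Dict.getD_counter]
  rw [List.map_congr_left (fun r _ => hg r),
      bucket_sum (fun r => PySem.List.pyGetD pat (PySem.Int.mod r len) 0)]
  congr 1
  apply List.countP_congr
  intro p _
  have h40 : PySem.Int.mod p.1 40 = p.1 % 40 := PySem.Int.mod_eq_emod_of_pos (by norm_num)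
  have hl1 : PySem.Int.mod p.1 len = p.1 % len := PySem.Int.mod_eq_emod_of_pos hlen
  have hl2 : PySem.Int.mod (p.1 % 40) len = (p.1 % 40) % len := PySem.Int.mod_eq_emod_of_pos hlen
  rw [h40, hl1, hl2, Int.emod_emod_of_dvd _ hdvd]

-- ===== VERDICT (by name: the statement is the Claim_ definition above) =====
theorem solution_spec : Claim_equal_solution := by
  intro answers _
  unfold Spec_solution solution solution_alt
  simp only [PySem.List.enumerate, List.foldl_cons, List.foldl_nil, List.map_cons, List.map_nil,
    List.length_cons, List.length_nil, show ((0:Int)+1) = 1 from rfl, show ((1:Int)+1) = 2 from rfl,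
    show (((0+1+1+1+1+1 : Nat) : Int)) = (5:Int) from rfl,
    show (((0+1+1+1+1+1+1+1+1 : Nat) : Int)) = (8:Int) from rfl,
    show (((0+1+1+1+1+1+1+1+1+1+1 : Nat) : Int)) = (10:Int) from rfl]
  rw [bump0, bump1, bump2, count_eq, count_eq, count_eq,
      score_eq answers [1,2,3,4,5] 5 (by norm_num) (by norm_num),
      score_eq answers [2,1,2,3,2,4,2,5] 8 (by norm_num) (by norm_num),
      score_eq answers [3,3,1,1,2,2,4,4,5,5] 10 (by norm_num) (by norm_num)]
  norm_num
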